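-- pv_equiv track=rewrite | github.com/jjans5/mamba-environment-manager | utils/yaml_repair.py | repair_mamba_yaml
-- ===== SOURCE A (Python) =====
-- def repair_mamba_yaml(yaml_content: str, env_name: str) -> str:
--     """
--     Attempt to repair common mamba YAML export issues
--
--     Args:
--         yaml_content: Raw YAML content from mamba export
--         env_name: Environment name for logging
--
--     Returns:
--         Repaired YAML content
--     """
--     import re
--     import yaml
--
--     # Common fixes for mamba YAML issues
--     repaired = yaml_content
--
--     # Fix 1: Ensure proper YAML structure
--     lines = repaired.split('\n')
--
--     # Fix 2: Handle malformed channels section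
--     # Sometimes mamba outputs channels in wrong format
--     for i, line in enumerate(lines):
--         if line.strip() == 'channels:':
--             # Check next line for proper format
--             if i + 1 < len(lines):
--                 next_line = lines[i + 1]
--                 # If next line doesn't start with '  -' or is empty, fix it
--                 if next_line.strip() and not next_line.strip().startswith('-'):
--                     # Assume it's a single channel without proper list format
--                     channel_name = next_line.strip()
--                     lines[i + 1] = f"  - {channel_name}"
--
--     # Fix 3: Handle malformed dependencies
--     in_dependencies = False
--     for i, line in enumerate(lines):
--         if line.strip() == 'dependencies:':
--             in_dependencies = True
--             continue
--         elif line.strip().endswith(':') and in_dependencies: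
--             in_dependencies = False
--         elif in_dependencies and line.strip() and not line.strip().startswith('-') and not line.strip().startswith('  -'):
--             # Fix dependency line that's missing the dash
--             if '=' in line.strip():  # Looks like a package spec
--                 lines[i] = f"  - {line.strip()}"
--
--     repaired = '\n'.join(lines)
--
--     # Fix 4: Remove any null bytes or other problematic characters
--     repaired = repaired.replace('\x00', '')
--
--     # Fix 5: Ensure UTF-8 encoding
--     repaired = repaired.encode('utf-8', errors='ignore').decode('utf-8')
--
--     return repaired
-- ===== SOURCE B (Python) =====
-- def repair_mamba_yaml(yaml_content: str, env_name: str) -> str: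
--     """
--     Attempt to repair common mamba YAML export issues.
--
--     Single pass over the split lines carrying two flags (previous line was
--     'channels:'; currently inside 'dependencies:') instead of two separate
--     repair loops over the whole line list.
--     """
--     out = []
--     prev_is_channels = False
--     in_dependencies = False
--     for raw in yaml_content.split('\n'):
--         line = raw
--         s = line.strip()
--         # channel fix: previous (already repaired) line was exactly 'channels:'
--         if prev_is_channels and s and not s.startswith('-'):
--             line = f"  - {s}"
--             s = line.strip()
--         # dependencies tracking / dependency fix, on the (possibly fixed) line
--         if s == 'dependencies:':
--             in_dependencies = True
--         elif in_dependencies and s.endswith(':'):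
--             in_dependencies = False
--         elif in_dependencies and s and not s.startswith('-') and '=' in s:
--             line = f"  - {s}"
--         out.append(line)
--         prev_is_channels = (s == 'channels:')
--     repaired = '\n'.join(out)
--     repaired = repaired.replace('\x00', '')
--     return repaired.encode('utf-8', errors='ignore').decode('utf-8')
-- ===== Notes on version B (the rewrite author's own statement) =====
-- stated objective: alternative
-- what changed: Replaces A's two separate repair passes over the line list (an index loop patching lines[i+1] after 'channels:', then a second flagged loop fixing dash-less dependency specs) with a single pass that walks the lines once carrying two flags (previous line was 'channels:', inside 'dependencies:') and emits each repaired line immediately; the final join/replace/encode steps are kept verbatim.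
import Mathlib
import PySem

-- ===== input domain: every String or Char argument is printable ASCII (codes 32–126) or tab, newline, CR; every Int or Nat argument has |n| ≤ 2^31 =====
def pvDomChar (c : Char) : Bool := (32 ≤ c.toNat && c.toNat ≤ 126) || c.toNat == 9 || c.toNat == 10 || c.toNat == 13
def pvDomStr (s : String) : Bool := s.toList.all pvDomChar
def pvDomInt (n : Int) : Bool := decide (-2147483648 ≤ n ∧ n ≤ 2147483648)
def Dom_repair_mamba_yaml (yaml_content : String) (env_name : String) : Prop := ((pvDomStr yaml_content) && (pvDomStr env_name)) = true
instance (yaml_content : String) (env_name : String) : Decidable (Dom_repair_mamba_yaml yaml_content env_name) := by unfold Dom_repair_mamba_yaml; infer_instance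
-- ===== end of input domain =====

-- B replaces A's two separate repair passes over the split lines by a single pass
-- carrying two flags (previous line was 'channels:', inside 'dependencies:'): an
-- alternative decomposition, same cost.


-- ===== PORT A =====
-- Fix 2 loop: `for i, line in enumerate(lines)` reads the current line (by the time it
-- is read it is final: only lines[i+1] is ever mutated) and repairs lines[i+1] in place;
-- as a recursion this reads the head and repairs the next element before recursing on it.
def pvFix2 : List String → List String
  | [] => []
  | [l] => [l]
  | l :: next :: rest =>
    if PySem.Str.strip l == "channels:" then
      -- i + 1 < len(lines) holds exactly in this branch shape
      if PySem.Str.strip next != "" && !PySem.Str.startswith (PySem.Str.strip next) "-" then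
        l :: pvFix2 (("  - " ++ PySem.Str.strip next) :: rest)
      else
        l :: pvFix2 (next :: rest)
    else
      l :: pvFix2 (next :: rest)
termination_by l => l.length

-- Fix 3 loop: mutation at index i only affects the current line, so it is a map with the
-- in_dependencies flag as carried state.
def pvFix3 (inDep : Bool) : List String → List String
  | [] => []
  | line :: rest =>
    let s := PySem.Str.strip line
    if s == "dependencies:" then
      line :: pvFix3 true rest
    else if PySem.Str.endswith s ":" && inDep then
      line :: pvFix3 false rest
    else if inDep && s != "" && !PySem.Str.startswith s "-" && !PySem.Str.startswith s "  -" then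
      (if PySem.Str.isIn "=" s then "  - " ++ s else line) :: pvFix3 inDep rest
    else
      line :: pvFix3 inDep rest

def repair_mamba_yaml (yaml_content : String) (env_name : String) : String :=
  -- lines = repaired.split('\n')  (sep ≠ "" so split? is always some)
  let lines := (PySem.Str.split? yaml_content "\n").getD []
  let lines := pvFix2 lines
  let lines := pvFix3 false lines
  let repaired := PySem.Str.join "\n" lines
  let repaired := PySem.Str.replace repaired "\x00" ""
  -- .encode('utf-8', errors='ignore').decode('utf-8') is the identity on str input
  repaired

-- ===== PORT B =====
-- One step of B's single loop; state = (out, prev_is_channels, in_dependencies).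
def pvRepairStep (st : List String × Bool × Bool) (raw : String) : List String × Bool × Bool :=
    let out := st.1
    let prevCh := st.2.1
    let inDep := st.2.2
    let line := if prevCh && PySem.Str.strip raw != "" && !PySem.Str.startswith (PySem.Str.strip raw) "-"
                then "  - " ++ PySem.Str.strip raw else raw
    let s := PySem.Str.strip line
    -- the if/elif chain updates (in_dependencies, line); rendered as one if-tree per variable
    let inDep' := if s == "dependencies:" then true
                  else if inDep && PySem.Str.endswith s ":" then false
                  else inDep
    let line' := if s == "dependencies:" then line
                 else if inDep && PySem.Str.endswith s ":" then line
                 else if inDep && s != "" && !PySem.Str.startswith s "-" && PySem.Str.isIn "=" s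
                 then "  - " ++ s else line
    (out ++ [line'], s == "channels:", inDep')

def repair_mamba_yaml_alt (yaml_content : String) (env_name : String) : String :=
  let lines := (PySem.Str.split? yaml_content "\n").getD []
  let st := lines.foldl pvRepairStep ([], false, false)
  let repaired := PySem.Str.join "\n" st.1
  let repaired := PySem.Str.replace repaired "\x00" ""
  -- .encode('utf-8', errors='ignore').decode('utf-8') is the identity on str input
  repaired

-- ===== PRECONDITION & SPEC =====
def Spec_repair_mamba_yaml (yaml_content : String) (env_name : String) (out : String) : Prop := out = repair_mamba_yaml_alt yaml_content env_name
instance (yaml_content : String) (env_name : String) (out : String) : Decidable (Spec_repair_mamba_yaml yaml_content env_name out) := by unfold Spec_repair_mamba_yaml; infer_instance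

-- ===== CLAIM (what is proved, stated in full; the proofs are below) =====
def Claim_equal_repair_mamba_yaml : Prop := ∀ (yaml_content : String) (env_name : String), Dom_repair_mamba_yaml yaml_content env_name → Spec_repair_mamba_yaml yaml_content env_name (repair_mamba_yaml yaml_content env_name)

-- ===== LEMMAS AND PROOFS =====

-- Fix 2 rephrased with a carried flag 'the previous (already repaired) line strips to "channels:"'.
def pvFix2Go (pc : Bool) : List String → List String
  | [] => []
  | l :: rest =>
    let l' := if pc && PySem.Str.strip l != "" && !PySem.Str.startswith (PySem.Str.strip l) "-"
              then "  - " ++ PySem.Str.strip l else l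
    l' :: pvFix2Go (PySem.Str.strip l' == "channels:") rest

lemma pvFix2_cons (rest : List String) : ∀ l : String,
    pvFix2 (l :: rest) = l :: pvFix2Go (PySem.Str.strip l == "channels:") rest := by
  induction rest with
  | nil => intro l; simp [pvFix2, pvFix2Go]
  | cons next rest ih =>
    intro l
    rw [pvFix2]
    by_cases h1 : PySem.Str.strip l == "channels:"
    · simp [pvFix2Go, h1, ih]
      try (split_ifs <;> rfl)
    · simp [pvFix2Go, h1, ih]

lemma pvFix2_eq (ls : List String) : pvFix2 ls = pvFix2Go false ls := by
  cases ls with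
  | nil => simp [pvFix2, pvFix2Go]
  | cons l rest => rw [pvFix2_cons]; simp [pvFix2Go]

-- A stripped string never starts with a space, so A's redundant '  -' test is always false.
lemma dropWhile_head?_false {p : Char → Bool} {l : List Char} {c : Char}
    (h : (List.dropWhile p l).head? = some c) : p c = false := by
  induction l with
  | nil => simp [List.dropWhile] at h
  | cons a l ih =>
    rw [List.dropWhile_cons] at h
    by_cases hp : p a = true
    · rw [if_pos hp] at h; exact ih h
    · rw [if_neg hp] at h
      simp only [List.head?_cons, Option.some.injEq] at h
      subst h
      simpa using hp

lemma strip_head?_not_space {cs : List Char} {c : Char}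
    (h : (PySem.Chars.strip cs).head? = some c) : PySem.Chars.isspace c = false := by
  unfold PySem.Chars.strip PySem.Chars.rstrip at h
  set m := PySem.Chars.lstrip cs with hm
  -- (dropWhile p m.reverse).reverse is a prefix of m, so its head is m's head
  have hpre : (List.dropWhile PySem.Chars.isspace m.reverse).reverse <+: m := by
    have := List.dropWhile_suffix (l := m.reverse) (p := PySem.Chars.isspace)
    have h2 := List.reverse_prefix.mpr this
    simpa using h2
  obtain ⟨t, ht⟩ := hpre
  have hm' : m.head? = some c := by
    rw [← ht]
    cases hcase : (List.dropWhile PySem.Chars.isspace m.reverse).reverse with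
    | nil => rw [hcase] at h; simp at h
    | cons d ds => rw [hcase] at h; simp at h; simp [h]
  exact dropWhile_head?_false (p := PySem.Chars.isspace) (l := cs) (by simpa [PySem.Chars.lstrip] using hm')

lemma strip_startswith_spaces (x : String) :
    PySem.Str.startswith (PySem.Str.strip x) "  -" = false := by
  simp only [PySem.Str.startswith, PySem.Chars.startswith]
  have hl : (PySem.Str.strip x).toList = PySem.Chars.strip x.toList := by
    simp [PySem.Str.strip]
  rw [hl]
  cases hcase : PySem.Chars.strip x.toList with
  | nil => rfl
  | cons d ds =>
    have hd : PySem.Chars.isspace d = false :=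
      strip_head?_not_space (cs := x.toList) (by simp [hcase])
    have hds : d ≠ ' ' := by
      intro h; rw [h] at hd; exact absurd hd (by decide)
    show List.isPrefixOf (' ' :: ' ' :: '-' :: []) (d :: ds) = false
    simp [List.isPrefixOf, Ne.symm hds]

-- One pass with two flags = Fix 2 (flag form) then Fix 3.
lemma pvFold_eq (ls : List String) : ∀ (out : List String) (pc inDep : Bool),
    (ls.foldl pvRepairStep (out, pc, inDep)).1 = out ++ pvFix3 inDep (pvFix2Go pc ls) := by
  induction ls with
  | nil => intro out pc inDep; simp [pvFix2Go, pvFix3]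
  | cons raw ls ih =>
    intro out pc inDep
    rw [List.foldl_cons]
    simp only [pvRepairStep, pvFix2Go, pvFix3]
    generalize (if pc && PySem.Str.strip raw != "" && !PySem.Str.startswith (PySem.Str.strip raw) "-"
                then "  - " ++ PySem.Str.strip raw else raw) = line
    generalize hs : PySem.Str.strip line = s
    have hsw : PySem.Chars.startswith s.toList [' ', ' ', '-'] = false := by
      have h := strip_startswith_spaces line
      rw [hs] at h
      simpa [PySem.Str.startswith] using h
    by_cases hdep : s == "dependencies:"
    · simp [hdep, ih]
    · cases inDep with
      | false => simp [hdep, ih]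
      | true =>
        by_cases hend : PySem.Chars.endswith s.toList [':']
        · simp [hdep, hend, ih]
        · by_cases hne : s = ""
          · simp [hne, ih, show PySem.Chars.endswith ([] : List Char) [':'] = false from rfl]
          · by_cases hdash : PySem.Chars.startswith s.toList ['-']
            · simp [hdep, hend, hdash, ih]
            · by_cases heq : PySem.Chars.isIn ['='] s.toList
              · simp [hdep, hend, hne, hdash, hsw, heq, ih]
              · simp [hdep, hend, hne, hdash, hsw, heq, ih]

lemma pvFold_nil_eq (ls : List String) :
    (ls.foldl pvRepairStep ([], false, false)).1 = pvFix3 false (pvFix2Go false ls) := by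
  simpa using pvFold_eq ls [] false false

-- ===== VERDICT (by name: the statement is the Claim_ definition above) =====
theorem repair_mamba_yaml_spec : Claim_equal_repair_mamba_yaml := by
  intro yaml_content env_name _hdom
  show repair_mamba_yaml yaml_content env_name = repair_mamba_yaml_alt yaml_content env_name
  unfold repair_mamba_yaml repair_mamba_yaml_alt
  simp only [pvFold_nil_eq, pvFix2_eq]
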